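-- pv_equiv track=rewrite | github.com/tarstars/algo_club | sandbox/users/tarstars/blue_and_red_ribbons/blue_and_red_ribbons.py | is_red_ribbon_visible
-- ===== SOURCE A (Python) =====
-- from typing import Tuple, List
--
-- class Event:
--     def __init__(self, coordinate, delta):
--         self.coordinate = coordinate
--         self.delta = delta
--
-- def is_red_ribbon_visible(red: Tuple[int, int],
--                           blues: List[Tuple[int, int]]):
--     events = [Event(coordinate=red[0], delta=-1),
--               Event(coordinate=red[1], delta=1)]
--
--     for blue_patch in blues:
--         events.append(Event(coordinate=blue_patch[0], delta=1))
--         events.append(Event(coordinate=blue_patch[1], delta=-1))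
--
--     events.sort(key=lambda event: (event.coordinate, -event.delta))
--
--     visibility_counter = 0
--     for ribbon in events:
--         visibility_counter += ribbon.delta
--         if visibility_counter == -1:
--             return True
--     return False
-- ===== SOURCE B (Python) =====
-- def is_red_ribbon_visible(red, blues):
--     # Direct per-coordinate check: the red ribbon is visible iff at some event
--     # coordinate the net cover depth (blue layers minus the red indicator) is
--     # negative.  Counts are signed, so degenerate (reversed) intervals subtract
--     # cover exactly as they do in the sweep formulation.
--     coords = {red[0], red[1]} | {x for b in blues for x in b}
--
--     def net(c):
--         return (sum(1 for b in blues if b[0] <= c)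
--                 - sum(1 for b in blues if b[1] <= c)
--                 - (1 if red[0] <= c else 0)
--                 + (1 if red[1] <= c else 0))
--
--     return any(net(c) < 0 for c in coords)
-- ===== Notes on version B (the rewrite author's own statement) =====
-- stated objective: alternative
-- what changed: Replaced the sorted-event early-exit counter sweep by a direct brute-force test: for each candidate event coordinate, count signed blue cover minus the red indicator and return True iff it is negative somewhere (no Event objects, no sorting, no sweep state).
import Mathlib
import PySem

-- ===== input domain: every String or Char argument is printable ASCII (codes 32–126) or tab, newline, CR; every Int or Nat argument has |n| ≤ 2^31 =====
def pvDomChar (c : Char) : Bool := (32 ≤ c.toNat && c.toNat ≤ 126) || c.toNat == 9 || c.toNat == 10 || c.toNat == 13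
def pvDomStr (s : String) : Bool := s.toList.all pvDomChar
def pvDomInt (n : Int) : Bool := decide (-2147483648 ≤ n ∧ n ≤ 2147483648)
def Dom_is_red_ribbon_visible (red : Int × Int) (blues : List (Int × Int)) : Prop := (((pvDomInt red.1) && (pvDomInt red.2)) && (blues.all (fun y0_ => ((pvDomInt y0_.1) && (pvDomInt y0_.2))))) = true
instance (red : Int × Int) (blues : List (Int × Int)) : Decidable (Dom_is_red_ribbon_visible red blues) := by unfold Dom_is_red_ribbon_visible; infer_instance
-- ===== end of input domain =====

-- B replaces A's sorted-event counter sweep by a direct per-candidate-coordinate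
-- net-cover test (no sorting, no sweep state); objective: alternative, not faster.

-- ===== PORT A =====
-- the early-return counter loop of A ('for ribbon in events: ... return True')
def irrvLoop : List (Int × Int) → Int → Bool
  | [], _ => false
  | e :: rest, acc => if acc + e.2 = -1 then true else irrvLoop rest (acc + e.2)

def is_red_ribbon_visible (red : Int × Int) (blues : List (Int × Int)) : Bool :=
  let events : List (Int × Int) :=
    blues.foldl (fun acc b => acc ++ [(b.1, (1 : Int)), (b.2, (-1 : Int))])
      [(red.1, -1), (red.2, 1)]
  irrvLoop (PySem.List.sorted2 events (fun e => e.1) (fun e => -e.2)) 0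

-- ===== PORT B =====
-- net(c): blue layers covering c minus the red indicator, all intervals counted signed
def irrvNet (red : Int × Int) (blues : List (Int × Int)) (c : Int) : Int :=
  ((blues.countP (fun b => decide (b.1 ≤ c)) : Int))
    - ((blues.countP (fun b => decide (b.2 ≤ c)) : Int))
    - (if red.1 ≤ c then 1 else 0)
    + (if red.2 ≤ c then 1 else 0)

def is_red_ribbon_visible_alt (red : Int × Int) (blues : List (Int × Int)) : Bool :=
  (PySem.Set.union (PySem.Set.ofList [red.1, red.2])
      (PySem.Set.ofList (blues.flatMap (fun b => [b.1, b.2])))).any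
    (fun c => decide (irrvNet red blues c < 0))

-- ===== PRECONDITION & SPEC =====
def Spec_is_red_ribbon_visible (red : Int × Int) (blues : List (Int × Int)) (out : Bool) : Prop := out = is_red_ribbon_visible_alt red blues
instance (red : Int × Int) (blues : List (Int × Int)) (out : Bool) : Decidable (Spec_is_red_ribbon_visible red blues out) := by unfold Spec_is_red_ribbon_visible; infer_instance

-- ===== CLAIM (what is proved, stated in full; the proofs are below) =====
def Claim_equal_is_red_ribbon_visible : Prop := ∀ (red : Int × Int) (blues : List (Int × Int)), Dom_is_red_ribbon_visible red blues → Spec_is_red_ribbon_visible red blues (is_red_ribbon_visible red blues)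

-- ===== LEMMAS AND PROOFS =====

-- the event list A builds, in closed form
def pvEvents (red : Int × Int) (blues : List (Int × Int)) : List (Int × Int) :=
  [(red.1, -1), (red.2, 1)] ++ blues.flatMap (fun b => [(b.1, 1), (b.2, -1)])

-- single integer key equivalent (on ±1 deltas) to A's tuple key (coordinate, -delta)
def pvEnc (e : Int × Int) : Int := 4 * e.1 - e.2

def pvDsum (M : List (Int × Int)) : Int := (M.map (fun e => e.2)).sum

def pvNetS (M : List (Int × Int)) (c : Int) : Int :=
  pvDsum (M.filter (fun e => decide (e.1 ≤ c)))

lemma pv_events_eq (red : Int × Int) (blues : List (Int × Int)) :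
    blues.foldl (fun acc b => acc ++ [(b.1, (1 : Int)), (b.2, (-1 : Int))])
      [(red.1, -1), (red.2, 1)] = pvEvents red blues := by
  simpa [pvEvents] using
    PySem.List.foldl_append_eq_flatMap
      (fun b : Int × Int => [(b.1, (1 : Int)), (b.2, (-1 : Int))]) blues
      [(red.1, -1), (red.2, 1)]

lemma pv_deltas (red : Int × Int) (blues : List (Int × Int)) :
    ∀ e ∈ pvEvents red blues, e.2 = 1 ∨ e.2 = -1 := by
  intro e he
  simp only [pvEvents, List.mem_append, List.mem_cons, List.mem_flatMap,
    List.not_mem_nil, or_false] at he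
  rcases he with (h | h) | ⟨b, _, h | h⟩ <;> subst h <;> simp

lemma pv_insertBy_congr {α : Type} (P : α → Prop) (p q : α → α → Bool)
    (hpq : ∀ a b, P a → P b → p a b = q a b) (x : α) :
    ∀ acc : List α, P x → (∀ a ∈ acc, P a) →
      PySem.List.insertBy p x acc = PySem.List.insertBy q x acc := by
  intro acc
  induction acc with
  | nil => intro _ _; rfl
  | cons y ys ih =>
    intro hx hacc
    have hy : P y := hacc y (by simp)
    simp only [PySem.List.insertBy, hpq x y hx hy]
    split
    · rfl
    · rw [ih hx (fun a ha => hacc a (List.mem_cons_of_mem _ ha))]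

lemma pv_foldl_insertBy_congr {α : Type} (P : α → Prop) (p q : α → α → Bool)
    (hpq : ∀ a b, P a → P b → p a b = q a b) :
    ∀ (xs acc : List α), (∀ a ∈ xs, P a) → (∀ a ∈ acc, P a) →
      xs.foldl (fun acc x => PySem.List.insertBy p x acc) acc
        = xs.foldl (fun acc x => PySem.List.insertBy q x acc) acc := by
  intro xs
  induction xs with
  | nil => intro acc _ _; rfl
  | cons x xs ih =>
    intro acc hxs hacc
    have hx : P x := hxs x (by simp)
    simp only [List.foldl_cons]
    rw [pv_insertBy_congr P p q hpq x acc hx hacc]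
    apply ih _ (fun a ha => hxs a (List.mem_cons_of_mem _ ha))
    intro a ha
    rcases (PySem.List.mem_insertBy q x a acc).mp ha with h | h
    · exact h ▸ hx
    · exact hacc a h

lemma pv_sorted2_eq (xs : List (Int × Int)) (h : ∀ e ∈ xs, e.2 = 1 ∨ e.2 = -1) :
    PySem.List.sorted2 xs (fun e => e.1) (fun e => -e.2)
      = PySem.List.sorted xs pvEnc := by
  rw [PySem.List.sorted_eq_foldl_insertBy]
  show xs.foldl (fun acc x => PySem.List.insertBy
      (fun a b => decide (a.1 < b.1) || (!decide (b.1 < a.1) && decide (-a.2 < -b.2))) x acc) []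
    = _
  apply pv_foldl_insertBy_congr (fun e => e.2 = 1 ∨ e.2 = -1) _ _ _ xs [] h (by simp)
  intro a b ha hb
  apply Bool.eq_iff_iff.mpr
  simp only [Bool.or_eq_true, Bool.and_eq_true, Bool.not_eq_true', decide_eq_true_iff,
    decide_eq_false_iff_not, pvEnc]
  rcases ha with ha | ha <;> rcases hb with hb | hb <;> omega

lemma pv_loop_of_neg :
    ∀ (P Q : List (Int × Int)) (acc : Int), (∀ e ∈ P, e.2 = 1 ∨ e.2 = -1) →
      0 ≤ acc → acc + pvDsum P < 0 → irrvLoop (P ++ Q) acc = true := by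
  intro P
  induction P with
  | nil =>
    intro Q acc _ h1 h2
    simp [pvDsum] at h2
    omega
  | cons e P' ih =>
    intro Q acc hd hacc hneg
    have he : e.2 = 1 ∨ e.2 = -1 := hd e (by simp)
    simp only [List.cons_append, irrvLoop]
    by_cases hh : acc + e.2 = -1
    · simp [hh]
    · rw [if_neg hh]
      apply ih Q (acc + e.2) (fun a ha => hd a (List.mem_cons_of_mem _ ha))
      · omega
      · simp only [pvDsum, List.map_cons, List.sum_cons] at hneg ⊢
        omega

lemma pv_loop_to :
    ∀ (M : List (Int × Int)) (acc : Int), (∀ e ∈ M, e.2 = 1 ∨ e.2 = -1) →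
      0 ≤ acc → irrvLoop M acc = true →
      ∃ P x Q, M = P ++ x :: Q ∧ x.2 = -1 ∧ acc + pvDsum P = 0 := by
  intro M
  induction M with
  | nil => intro acc _ _ h; simp [irrvLoop] at h
  | cons e rest ih =>
    intro acc hd hacc hrun
    have he : e.2 = 1 ∨ e.2 = -1 := hd e (by simp)
    simp only [irrvLoop] at hrun
    by_cases hh : acc + e.2 = -1
    · exact ⟨[], e, rest, by simp, by omega, by simp [pvDsum]; omega⟩
    · rw [if_neg hh] at hrun
      obtain ⟨P', x, Q, hM, hx, hsum⟩ :=
        ih (acc + e.2) (fun a ha => hd a (List.mem_cons_of_mem _ ha)) (by omega) hrun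
      refine ⟨e :: P', x, Q, by simp [hM], hx, ?_⟩
      simp only [pvDsum, List.map_cons, List.sum_cons] at hsum ⊢
      omega

lemma pv_takeWhile_eq_filter {α : Type} (p : α → Bool) :
    ∀ L : List α, L.Pairwise (fun a b => p b = true → p a = true) →
      L.takeWhile p = L.filter p := by
  intro L
  induction L with
  | nil => intro _; rfl
  | cons a l ih =>
    intro hp
    rcases List.pairwise_cons.mp hp with ⟨ha, hl⟩
    by_cases hpa : p a = true
    · simp [hpa, ih hl]
    · have : l.filter p = [] :=
        List.filter_eq_nil_iff.mpr (fun b hb hpb => hpa (ha b hb hpb))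
      simp [hpa, this]

lemma pv_dsum_nonpos : ∀ N : List (Int × Int), (∀ e ∈ N, e.2 ≤ 0) → pvDsum N ≤ 0 := by
  intro N
  induction N with
  | nil => intro _; simp [pvDsum]
  | cons e l ih =>
    intro h
    have h1 := h e (by simp)
    have h2 := ih (fun a ha => h a (List.mem_cons_of_mem _ ha))
    simp only [pvDsum, List.map_cons, List.sum_cons] at h2 ⊢
    omega

lemma pv_netS_perm {L M : List (Int × Int)} (h : L.Perm M) (c : Int) :
    pvNetS L c = pvNetS M c := by
  unfold pvNetS pvDsum
  exact ((h.filter _).map _).sum_eq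

lemma pv_netS_flatMap (blues : List (Int × Int)) (c : Int) :
    pvNetS (blues.flatMap (fun b => [(b.1, (1 : Int)), (b.2, (-1 : Int))])) c
      = (blues.countP (fun b => decide (b.1 ≤ c)) : Int)
        - (blues.countP (fun b => decide (b.2 ≤ c)) : Int) := by
  induction blues with
  | nil => simp [pvNetS, pvDsum]
  | cons b bs ih =>
    simp only [List.flatMap_cons, pvNetS, pvDsum, List.filter_append, List.map_append,
      List.sum_append, List.countP_cons] at ih ⊢
    by_cases h1 : b.1 ≤ c <;> by_cases h2 : b.2 ≤ c <;>
      simp [h1, h2] <;> omega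

lemma pv_netS_events (red : Int × Int) (blues : List (Int × Int)) (c : Int) :
    pvNetS (pvEvents red blues) c = irrvNet red blues c := by
  have hf := pv_netS_flatMap blues c
  simp only [pvNetS, pvDsum, pvEvents, List.filter_append, List.map_append,
    List.sum_append, irrvNet] at hf ⊢
  by_cases h1 : red.1 ≤ c <;> by_cases h2 : red.2 ≤ c <;>
    simp [h1, h2] <;> omega

lemma pv_mem_coords (red : Int × Int) (blues : List (Int × Int)) (c : Int) :
    c ∈ PySem.Set.union (PySem.Set.ofList [red.1, red.2])
        (PySem.Set.ofList (blues.flatMap (fun b => [b.1, b.2])))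
      ↔ c ∈ (pvEvents red blues).map (fun e => e.1) := by
  simp only [PySem.Set.mem_union, PySem.Set.mem_ofList, pvEvents, List.map_append,
    List.mem_append, List.map_cons, List.map_nil, List.mem_cons, List.mem_flatMap,
    List.not_mem_nil, or_false, List.map_flatMap]

-- ===== VERDICT (by name: the statement is the Claim_ definition above) =====
theorem is_red_ribbon_visible_spec : Claim_equal_is_red_ribbon_visible := by
  intro red blues _
  unfold Spec_is_red_ribbon_visible
  have hdE : ∀ e ∈ pvEvents red blues, e.2 = 1 ∨ e.2 = -1 := pv_deltas red blues
  have hA : is_red_ribbon_visible red blues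
      = irrvLoop (PySem.List.sorted (pvEvents red blues) pvEnc) 0 := by
    have h0 : is_red_ribbon_visible red blues
        = irrvLoop (PySem.List.sorted2
            (blues.foldl (fun acc b => acc ++ [(b.1, (1 : Int)), (b.2, (-1 : Int))])
              [(red.1, -1), (red.2, 1)]) (fun e => e.1) (fun e => -e.2)) 0 := rfl
    rw [h0, pv_events_eq, pv_sorted2_eq _ hdE]
  set L := PySem.List.sorted (pvEvents red blues) pvEnc with hLdef
  have hperm : L.Perm (pvEvents red blues) := PySem.List.sorted_perm _ _ _
  have hdL : ∀ e ∈ L, e.2 = 1 ∨ e.2 = -1 := fun e he => hdE e (hperm.mem_iff.mp he)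
  have hpair : L.Pairwise (fun a b => pvEnc a ≤ pvEnc b) :=
    PySem.List.sorted_pairwise _ _
  rw [hA]
  apply Bool.eq_iff_iff.mpr
  unfold is_red_ribbon_visible_alt
  rw [List.any_eq_true]
  constructor
  · -- A true → B true
    intro hrun
    obtain ⟨P, x, Q, hM, hx, hsum⟩ := pv_loop_to L 0 hdL le_rfl hrun
    set c := x.1 with hc
    have hxL : x ∈ L := by rw [hM]; simp
    rw [hM] at hpair
    rcases List.pairwise_append.mp hpair with ⟨_, hxQpair, hPx⟩
    rcases List.pairwise_cons.mp hxQpair with ⟨hxQ, _⟩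
    -- every element of P has coordinate ≤ c
    have hPle : ∀ a ∈ P, a.1 ≤ c := by
      intro a ha
      have h1 := hPx a ha x (by simp)
      have h2 := hdL a (by rw [hM]; simp [ha])
      simp only [pvEnc] at h1
      omega
    have hfP : P.filter (fun e => decide (e.1 ≤ c)) = P :=
      List.filter_eq_self.mpr (fun a ha => by simpa using hPle a ha)
    have hQle : ∀ e ∈ Q.filter (fun e => decide (e.1 ≤ c)), e.2 ≤ 0 := by
      intro e he
      rcases List.mem_filter.mp he with ⟨heQ, hec⟩
      have h1 := hxQ e heQ
      have h2 := hdL e (by rw [hM]; simp [heQ])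
      simp only [pvEnc] at h1
      simp only [decide_eq_true_iff] at hec
      omega
    have hneg : pvNetS L c < 0 := by
      rw [hM]
      simp only [pvNetS, List.filter_append, List.filter_cons, hfP]
      have hcx : decide (x.1 ≤ c) = true := by simp [hc]
      rw [hcx]
      simp only [if_true, pvDsum, List.map_append, List.sum_append, List.map_cons,
        List.sum_cons]
      have := pv_dsum_nonpos _ hQle
      simp only [pvDsum] at this
      simp only [pvDsum] at hsum
      omega
    refine ⟨c, ?_, ?_⟩
    · apply (pv_mem_coords red blues c).mpr
      exact List.mem_map.mpr ⟨x, hperm.mem_iff.mp hxL, rfl⟩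
    · rw [decide_eq_true_iff, ← pv_netS_events, ← pv_netS_perm hperm]
      exact hneg
  · -- B true → A true
    rintro ⟨c, _, hc⟩
    rw [decide_eq_true_iff, ← pv_netS_events, ← pv_netS_perm hperm] at hc
    have hmono : L.Pairwise (fun a b =>
        decide (b.1 ≤ c) = true → decide (a.1 ≤ c) = true) := by
      apply hpair.imp_of_mem
      intro a b ha hb hab
      have h1 := hdL a ha
      have h2 := hdL b hb
      simp only [pvEnc] at hab
      simp only [decide_eq_true_iff]
      omega
    have htw : L.takeWhile (fun e => decide (e.1 ≤ c))
        = L.filter (fun e => decide (e.1 ≤ c)) := pv_takeWhile_eq_filter _ L hmono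
    have hsplit := List.takeWhile_append_dropWhile
      (p := fun e : Int × Int => decide (e.1 ≤ c)) (l := L)
    rw [← hsplit]
    apply pv_loop_of_neg
    · intro e he
      apply hdL
      rw [← hsplit]
      exact List.mem_append_left _ he
    · exact le_rfl
    · rw [htw]
      simpa [pvNetS] using hc
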